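-- pv_equiv track=rewrite | github.com/Junwang1993/Edit | EdittingVisualization/FixationDetection.py | fixation_IDT_V2
-- ===== SOURCE A (Python) =====
-- def fixation_IDT_V2(x, y, time, tfix = 180, dmax = 80):
--     Efix1D = []
--     EfixIndex = []
--     EfixTuple =[]
--     i = 0
--     while i < len(x):
--         o = [x[i], y[i]]
--         maxX = o[0]
--         minX = o[0]
--         maxY = o[1]
--         minY = o[1]
--         j = 1
--         while j+i < len(x):
--             next = [x[i+j], y[i+j]]
--             if next[0] > maxX:
--                 maxX = next[0]
--             if next[0] < minX:
--                 minX = next[0]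
--             if next[1] > maxY:
--                 maxY = next[1]
--             if next[1] < minY:
--                 minY = next[1]
--             d = (maxX - minX)+(maxY - minY)
--             if d > dmax:
--                 break
--             j = j+1
--         position = i+j-1
--         if position >= len(x):
--             position = len(x)
--         if position < 0:
--             position = 0
--         if time[position] - time[i] > tfix:
--             Efix1D.append(time[i])
--             Efix1D.append(time[position])
--             # EfixIndex.append(i)
--             # EfixIndex.append(position)
--             EfixTuple.append((i, position))
--             for addingIndex in range(i, position):
--                 EfixIndex.append(addingIndex)
--             start_index = i
--             for index in range(start_index, position):
--                 i = i+1
--         else: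
--             i = i+1
--     return Efix1D, EfixIndex, EfixTuple
-- ===== SOURCE B (Python) =====
-- # Two-pointer sliding window over the gaze trace with a two-stack min/max queue:
-- # both window ends only move right, so every point is pushed/popped O(1) amortized
-- # instead of rescanning the window from each start index.
--
-- def _push(stack, px, py):
--     if stack:
--         _, _, MX, mX, MY, mY = stack[-1]
--         stack.append((px, py, max(MX, px), min(mX, px), max(MY, py), min(mY, py)))
--     else:
--         stack.append((px, py, px, px, py, py))
--
-- def _pop_front(front, back):
--     if not front:
--         while back:
--             px, py, _, _, _, _ = back.pop()
--             _push(front, px, py)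
--     front.pop()
--
-- def _extrema(front, back):
--     if front and back:
--         _, _, a1, b1, c1, d1 = front[-1]
--         _, _, a2, b2, c2, d2 = back[-1]
--         return max(a1, a2), min(b1, b2), max(c1, c2), min(d1, d2)
--     _, _, a, b, c, d = (front if front else back)[-1]
--     return a, b, c, d
--
-- def fixation_IDT_V2(x, y, time, tfix=180, dmax=80):
--     n = len(x)
--     Efix1D, EfixIndex, EfixTuple = [], [], []
--     front, back = [], []   # queue of window points [wl, wr)
--     wl = wr = 0
--     i = 0
--     while i < n:
--         while wl < i:
--             _pop_front(front, back)
--             wl += 1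
--         if wr == i:
--             _push(back, x[i], y[i])
--             wr += 1
--         while wr < n:
--             MX, mX, MY, mY = _extrema(front, back)
--             a, b = x[wr], y[wr]
--             MX, mX, MY, mY = max(MX, a), min(mX, a), max(MY, b), min(mY, b)
--             if (MX - mX) + (MY - mY) > dmax:
--                 break
--             _push(back, a, b)
--             wr += 1
--         position = wr - 1
--         if time[position] - time[i] > tfix:
--             Efix1D.append(time[i])
--             Efix1D.append(time[position])
--             EfixTuple.append((i, position))
--             EfixIndex.extend(range(i, position))
--             i = position
--         else:
--             i += 1
--     return Efix1D, EfixIndex, EfixTuple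
-- ===== Notes on version B (the rewrite author's own statement) =====
-- stated objective: faster
-- what changed: A rescans and regrows the dispersion window from scratch at every start index (nested while loops); B slides a two-pointer window whose left and right ends only move forward, maintaining window max/min of X and Y with an amortized-O(1) two-stack min/max queue.
-- outside the precondition, e.g. on fixation_IDT_V2([1, 2], [0], [0, 500], 200, 80): A raises IndexError, B raises IndexError
import Mathlib
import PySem

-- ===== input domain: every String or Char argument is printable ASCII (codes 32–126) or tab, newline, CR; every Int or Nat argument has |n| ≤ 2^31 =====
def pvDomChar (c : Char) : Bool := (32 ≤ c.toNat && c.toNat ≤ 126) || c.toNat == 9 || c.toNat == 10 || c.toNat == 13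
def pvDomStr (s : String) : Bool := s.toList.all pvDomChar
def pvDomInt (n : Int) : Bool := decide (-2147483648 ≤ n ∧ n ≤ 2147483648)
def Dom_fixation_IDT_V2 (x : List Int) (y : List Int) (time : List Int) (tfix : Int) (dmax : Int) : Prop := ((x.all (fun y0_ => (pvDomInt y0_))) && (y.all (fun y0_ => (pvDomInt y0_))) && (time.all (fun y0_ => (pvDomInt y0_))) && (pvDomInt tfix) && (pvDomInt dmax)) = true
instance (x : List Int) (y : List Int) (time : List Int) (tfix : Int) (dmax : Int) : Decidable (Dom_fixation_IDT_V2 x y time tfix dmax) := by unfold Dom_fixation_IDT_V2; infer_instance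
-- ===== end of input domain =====

-- B replaces A's restart-from-scratch dispersion scan by a two-pointer sliding window with a
-- two-stack min/max queue (objective: faster); A raises IndexError when y or time is shorter
-- than x and loops forever when x is nonempty and tfix < 0, so Pre_ excludes exactly those inputs.

-- ===== PORT A =====
-- inner while loop of A: grows j while the window dispersion stays ≤ dmax; returns final j.
-- fuel only makes the recursion structural (fuel = n is always enough, j+i < n gates each step).
def innerA (x y : List Int) (dmax : Int) (n i : Nat) :
    Nat → Nat → Int → Int → Int → Int → Nat
  | 0, j, _, _, _, _ => j
  | fuel+1, j, maxX, minX, maxY, minY =>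
    if j + i < n then
      let nx := x.getD (i+j) 0
      let ny := y.getD (i+j) 0
      let maxX := if nx > maxX then nx else maxX
      let minX := if nx < minX then nx else minX
      let maxY := if ny > maxY then ny else maxY
      let minY := if ny < minY then ny else minY
      if (maxX - minX) + (maxY - minY) > dmax then j
      else innerA x y dmax n i fuel (j+1) maxX minX maxY minY
    else j

-- outer while loop of A; fuel = n+1 suffices whenever the Python terminates (i grows each round).
def outerA (x y time : List Int) (tfix dmax : Int) (n : Nat) :
    Nat → Nat → List Int × List Int × List (Int × Int) → List Int × List Int × List (Int × Int)
  | 0, _, acc => acc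
  | fuel+1, i, acc =>
    if i < n then
      let ox := x.getD i 0
      let oy := y.getD i 0
      let j := innerA x y dmax n i n 1 ox ox oy oy
      let position := i + j - 1
      let position := if position ≥ n then n else position
      -- Python's `if position < 0: position = 0` is vacuous over Nat (i+j ≥ 1)
      if time.getD position 0 - time.getD i 0 > tfix then
        outerA x y time tfix dmax n fuel position
          (acc.1 ++ [time.getD i 0, time.getD position 0],
           acc.2.1 ++ (List.range' i (position - i)).map (fun t => (t : Int)),
           acc.2.2 ++ [((i : Int), (position : Int))])
      else outerA x y time tfix dmax n fuel (i+1) acc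
    else acc

def fixation_IDT_V2 (x : List Int) (y : List Int) (time : List Int) (tfix : Int) (dmax : Int) : List Int × List Int × (List (Int × Int)) :=
  outerA x y time tfix dmax x.length (x.length + 1) 0 ([], [], [])

-- ===== PORT B =====
-- stack entry of the two-stack min/max queue: point (px,py) plus cached extrema of this
-- entry and everything below it.
structure St where
  px : Int
  py : Int
  cMX : Int
  cmX : Int
  cMY : Int
  cmY : Int
deriving Repr, DecidableEq

-- B's _push
def pushQ (s : List St) (a b : Int) : List St :=
  match s with
  | [] => [⟨a, b, a, a, b, b⟩]
  | e :: rest => ⟨a, b, max e.cMX a, min e.cmX a, max e.cMY b, min e.cmY b⟩ :: e :: rest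

-- B's `while back: ... _push(front, ...)` inside _pop_front
def flushQ : List St → List St → List St
  | [], f => f
  | e :: rest, f => flushQ rest (pushQ f e.px e.py)

-- B's _pop_front (the [],[] case is unreachable in B's flow: the queue is nonempty there)
def popFrontQ (front back : List St) : List St × List St :=
  match front with
  | _ :: f => (f, back)
  | [] =>
    match flushQ back [] with
    | _ :: f => (f, [])
    | [] => ([], [])

-- B's _extrema (the [],[] case is unreachable in B's flow)
def qExtrema (front back : List St) : Int × Int × Int × Int :=
  match front, back with
  | ef :: _, eb :: _ => (max ef.cMX eb.cMX, min ef.cmX eb.cmX, max ef.cMY eb.cMY, min ef.cmY eb.cmY)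
  | ef :: _, [] => (ef.cMX, ef.cmX, ef.cMY, ef.cmY)
  | [], eb :: _ => (eb.cMX, eb.cmX, eb.cMY, eb.cmY)
  | [], [] => (0, 0, 0, 0)

-- B's `while wl < i: _pop_front(...); wl += 1`
def popLoop (front back : List St) (wl i : Nat) : List St × List St × Nat :=
  if wl < i then
    let r := popFrontQ front back
    popLoop r.1 r.2 (wl + 1) i
  else (front, back, wl)
termination_by i - wl

-- B's `while wr < n: ...` extension loop (fuel = n is always enough: wr < n gates each step)
def growLoop (x y : List Int) (dmax : Int) (n : Nat) :
    Nat → Nat → List St → List St → List St × List St × Nat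
  | 0, wr, front, back => (front, back, wr)
  | fuel+1, wr, front, back =>
    if wr < n then
      let q := qExtrema front back
      let a := x.getD wr 0
      let b := y.getD wr 0
      let MX := max q.1 a
      let mX := min q.2.1 a
      let MY := max q.2.2.1 b
      let mY := min q.2.2.2 b
      if (MX - mX) + (MY - mY) > dmax then (front, back, wr)
      else growLoop x y dmax n fuel (wr+1) front (pushQ back a b)
    else (front, back, wr)

-- B's outer while loop
def outerB (x y time : List Int) (tfix dmax : Int) (n : Nat) :
    Nat → Nat → Nat → Nat → List St → List St →
    List Int × List Int × List (Int × Int) → List Int × List Int × List (Int × Int)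
  | 0, _, _, _, _, _, acc => acc
  | fuel+1, i, wl, wr, front, back, acc =>
    if i < n then
      let pr := popLoop front back wl i
      let front := pr.1
      let back := pr.2.1
      let wl := pr.2.2
      let st :=
        if wr = i then (pushQ back (x.getD i 0) (y.getD i 0), wr + 1)
        else (back, wr)
      let back := st.1
      let wr := st.2
      let gr := growLoop x y dmax n n wr front back
      let front := gr.1
      let back := gr.2.1
      let wr := gr.2.2
      let position := wr - 1
      if time.getD position 0 - time.getD i 0 > tfix then
        outerB x y time tfix dmax n fuel position wl wr front back
          (acc.1 ++ [time.getD i 0, time.getD position 0],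
           acc.2.1 ++ (List.range' i (position - i)).map (fun t => (t : Int)),
           acc.2.2 ++ [((i : Int), (position : Int))])
      else outerB x y time tfix dmax n fuel (i+1) wl wr front back acc
    else acc

def fixation_IDT_V2_alt (x : List Int) (y : List Int) (time : List Int) (tfix : Int) (dmax : Int) : List Int × List Int × (List (Int × Int)) :=
  outerB x y time tfix dmax x.length (x.length + 1) 0 0 0 [] [] ([], [], [])

-- ===== PRECONDITION & SPEC =====
-- Pre_ excludes exactly the inputs where the Python A does not return: it raises IndexError
-- when y or time is shorter than a nonempty x, and loops forever when x ≠ [] and tfix < 0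
-- (at i = n-1 the window is a single sample, time[i]-time[i] = 0 > tfix, and i never advances).
def Pre_fixation_IDT_V2 (x : List Int) (y : List Int) (time : List Int) (tfix : Int) (dmax : Int) : Prop :=
  x = [] ∨ (0 ≤ tfix ∧ x.length ≤ y.length ∧ x.length ≤ time.length)

instance (x : List Int) (y : List Int) (time : List Int) (tfix : Int) (dmax : Int) : Decidable (Pre_fixation_IDT_V2 x y time tfix dmax) := by unfold Pre_fixation_IDT_V2; infer_instance

def pvWitness_fixation_IDT_V2 : List Int × List Int × List Int × Int × Int :=
  ([0, 1, 50, 51], [0, 0, 0, 0], [0, 100, 400, 500], 150, 10)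

def Spec_fixation_IDT_V2 (x : List Int) (y : List Int) (time : List Int) (tfix : Int) (dmax : Int) (out : List Int × List Int × (List (Int × Int))) : Prop := out = fixation_IDT_V2_alt x y time tfix dmax
instance (x : List Int) (y : List Int) (time : List Int) (tfix : Int) (dmax : Int) (out : List Int × List Int × (List (Int × Int))) : Decidable (Spec_fixation_IDT_V2 x y time tfix dmax out) := by unfold Spec_fixation_IDT_V2; infer_instance

-- ===== CLAIM (what is proved, stated in full; the proofs are below) =====
def Claim_equal_fixation_IDT_V2 : Prop := ∀ (x : List Int) (y : List Int) (time : List Int) (tfix : Int) (dmax : Int), Dom_fixation_IDT_V2 x y time tfix dmax → Pre_fixation_IDT_V2 x y time tfix dmax → Spec_fixation_IDT_V2 x y time tfix dmax (fixation_IDT_V2 x y time tfix dmax)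

-- ===== LEMMAS AND PROOFS =====

-- ----- proof-side abstractions: extrema quadruples (maxX, minX, maxY, minY) -----

def quadP (p : Int × Int) : Int × Int × Int × Int := (p.1, p.1, p.2, p.2)

def qcomb (e f : Int × Int × Int × Int) : Int × Int × Int × Int :=
  (max e.1 f.1, min e.2.1 f.2.1, max e.2.2.1 f.2.2.1, min e.2.2.2 f.2.2.2)

def dispv (e : Int × Int × Int × Int) : Int := (e.1 - e.2.1) + (e.2.2.1 - e.2.2.2)

def Fq (e : Int × Int × Int × Int) (l : List (Int × Int)) : Int × Int × Int × Int :=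
  l.foldl (fun e p => qcomb e (quadP p)) e

def Eq4 : List (Int × Int) → Int × Int × Int × Int
  | [] => (0, 0, 0, 0)
  | p :: t => Fq (quadP p) t

theorem qcomb_comm (e f : Int × Int × Int × Int) : qcomb e f = qcomb f e := by
  obtain ⟨a, b, c, d⟩ := e; obtain ⟨a', b', c', d'⟩ := f
  simp [qcomb, max_comm, min_comm]

theorem qcomb_assoc (e f g : Int × Int × Int × Int) :
    qcomb (qcomb e f) g = qcomb e (qcomb f g) := by
  obtain ⟨a, b, c, d⟩ := e; obtain ⟨a', b', c', d'⟩ := f; obtain ⟨a'', b'', c'', d''⟩ := g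
  simp [qcomb, max_assoc, min_assoc]

theorem Fq_cons (e : Int × Int × Int × Int) (p : Int × Int) (t : List (Int × Int)) :
    Fq e (p :: t) = Fq (qcomb e (quadP p)) t := rfl

theorem Fq_append (e : Int × Int × Int × Int) (l₁ l₂ : List (Int × Int)) :
    Fq e (l₁ ++ l₂) = Fq (Fq e l₁) l₂ := List.foldl_append ..

theorem Fq_out : ∀ (t : List (Int × Int)) (e f : Int × Int × Int × Int),
    qcomb (Fq e t) f = Fq (qcomb e f) t := by
  intro t
  induction t with
  | nil => intro e f; rfl
  | cons p t ih =>
    intro e f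
    rw [Fq_cons, Fq_cons, ih]
    congr 1
    rw [qcomb_assoc, qcomb_assoc, qcomb_comm (quadP p) f]

theorem Fq_Eq4 (l : List (Int × Int)) (h : l ≠ []) (e : Int × Int × Int × Int) :
    Fq e l = qcomb e (Eq4 l) := by
  match l with
  | p :: t =>
    show Fq (qcomb e (quadP p)) t = qcomb e (Fq (quadP p) t)
    rw [qcomb_comm e (Fq (quadP p) t), Fq_out, qcomb_comm (quadP p) e]

theorem Eq4_cons (p : Int × Int) (t : List (Int × Int)) (h : t ≠ []) :
    Eq4 (p :: t) = qcomb (quadP p) (Eq4 t) := by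
  show Fq (quadP p) t = _
  rw [Fq_Eq4 t h]

theorem Eq4_concat (l : List (Int × Int)) (h : l ≠ []) (p : Int × Int) :
    Eq4 (l ++ [p]) = qcomb (Eq4 l) (quadP p) := by
  match l with
  | q :: t =>
    show Fq (quadP q) (t ++ [p]) = qcomb (Fq (quadP q) t) (quadP p)
    rw [Fq_append]
    rfl

theorem Eq4_append (l₁ l₂ : List (Int × Int)) (h₁ : l₁ ≠ []) (h₂ : l₂ ≠ []) :
    Eq4 (l₁ ++ l₂) = qcomb (Eq4 l₁) (Eq4 l₂) := by
  match l₁ with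
  | p :: t =>
    show Fq (quadP p) (t ++ l₂) = qcomb (Fq (quadP p) t) (Eq4 l₂)
    rw [Fq_append, Fq_Eq4 l₂ h₂]

theorem Eq4_reverse : ∀ l : List (Int × Int), Eq4 l.reverse = Eq4 l := by
  intro l
  induction l with
  | nil => rfl
  | cons p t ih =>
    rw [List.reverse_cons]
    by_cases ht : t = []
    · subst ht; rfl
    · rw [Eq4_concat _ (by simpa using ht), ih, qcomb_comm, ← Eq4_cons p t ht]

-- ----- index-window point lists and window extrema -----

def ptsL (x y : List Int) (a b : Nat) : List (Int × Int) :=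
  (List.range' a (b - a)).map (fun t => (x.getD t 0, y.getD t 0))

theorem ptsL_nil (x y : List Int) {a b : Nat} (h : b ≤ a) : ptsL x y a b = [] := by
  simp [ptsL, Nat.sub_eq_zero_of_le h]

theorem ptsL_cons (x y : List Int) {a b : Nat} (h : a < b) :
    ptsL x y a b = (x.getD a 0, y.getD a 0) :: ptsL x y (a+1) b := by
  unfold ptsL
  have hb : b - a = (b - (a+1)) + 1 := by omega
  rw [hb, List.range'_succ]
  rfl

theorem ptsL_concat (x y : List Int) {a b : Nat} (h : a ≤ b) :
    ptsL x y a (b+1) = ptsL x y a b ++ [(x.getD b 0, y.getD b 0)] := by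
  unfold ptsL
  have hb : b + 1 - a = (b - a) + 1 := by omega
  rw [hb, List.range'_concat, List.map_append]
  have h2 : a + 1 * (b - a) = b := by omega
  rw [h2]
  rfl

theorem ptsL_append (x y : List Int) {a b c : Nat} (hab : a ≤ b) (hbc : b ≤ c) :
    ptsL x y a b ++ ptsL x y b c = ptsL x y a c := by
  unfold ptsL
  rw [← List.map_append]
  congr 1
  have h1 : a + 1 * (b - a) = b := by omega
  have h2 := List.range'_append (s := a) (m := b - a) (n := c - b) (step := 1)
  rw [h1] at h2
  rw [h2]
  congr 1
  omega

theorem ptsL_ne (x y : List Int) {a b : Nat} (h : a < b) : ptsL x y a b ≠ [] := by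
  rw [ptsL_cons x y h]; simp

def ext4 (x y : List Int) (i : Nat) : Nat → Int × Int × Int × Int
  | 0 => quadP (x.getD i 0, y.getD i 0)
  | k+1 => qcomb (ext4 x y i k) (quadP (x.getD (i+k+1) 0, y.getD (i+k+1) 0))

theorem ext4_eq (x y : List Int) (i : Nat) :
    ∀ k, ext4 x y i k = Eq4 (ptsL x y i (i + k + 1)) := by
  intro k
  induction k with
  | zero =>
    rw [ptsL_cons x y (by omega), ptsL_nil x y (by omega)]
    rfl
  | succ k ih =>
    have h1 : i + (k+1) + 1 = (i + k + 1) + 1 := by omega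
    rw [h1, ptsL_concat x y (by omega), Eq4_concat _ (ptsL_ne x y (by omega))]
    rw [ext4, ih]

theorem dispv_qcomb_left (e f : Int × Int × Int × Int) : dispv e ≤ dispv (qcomb e f) := by
  obtain ⟨a, b, c, d⟩ := e; obtain ⟨a', b', c', d'⟩ := f
  simp only [dispv, qcomb]
  have h1 := le_max_left a a'
  have h2 := min_le_left b b'
  have h3 := le_max_left c c'
  have h4 := min_le_left d d'
  omega

theorem dispv_qcomb_right (e f : Int × Int × Int × Int) : dispv f ≤ dispv (qcomb e f) := by
  rw [qcomb_comm]; exact dispv_qcomb_left f e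

theorem dispv_ext4_mono (x y : List Int) (i : Nat) :
    ∀ {k k' : Nat}, k ≤ k' → dispv (ext4 x y i k) ≤ dispv (ext4 x y i k') := by
  intro k k' h
  induction k' with
  | zero => have : k = 0 := by omega
            subst this; exact le_refl _
  | succ k' ih =>
    rcases Nat.lt_or_ge k (k'+1) with h' | h'
    · exact le_trans (ih (by omega)) (by rw [ext4]; exact dispv_qcomb_left ..)
    · have : k = k' + 1 := by omega
      subst this; exact le_refl _

theorem dispv_left_step (x y : List Int) {i q : Nat} (h : i < q) :
    dispv (ext4 x y (i+1) (q - (i+1))) ≤ dispv (ext4 x y i (q - i)) := by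
  have e1 : (i+1) + (q - (i+1)) + 1 = q + 1 := by omega
  have e2 : i + (q - i) + 1 = q + 1 := by omega
  rw [ext4_eq, ext4_eq, e1, e2]
  rw [ptsL_cons x y (show i < q + 1 by omega)]
  rw [Eq4_cons _ _ (ptsL_ne x y (show i + 1 < q + 1 by omega))]
  exact dispv_qcomb_right ..

-- the common specification of the window end: extend p while dispersion of [i, p+1] stays ≤ dmax
def grow1 (x y : List Int) (dmax : Int) (n i p : Nat) : Nat :=
  if h : p + 1 < n ∧ dispv (ext4 x y i (p + 1 - i)) ≤ dmax then grow1 x y dmax n i (p+1) else p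
termination_by n - p
decreasing_by have := h.1; omega

theorem grow1_step (x y : List Int) (dmax : Int) (n i : Nat) {p : Nat}
    (h1 : p + 1 < n) (h2 : dispv (ext4 x y i (p + 1 - i)) ≤ dmax) :
    grow1 x y dmax n i p = grow1 x y dmax n i (p+1) := by
  rw [grow1]; rw [dif_pos ⟨h1, h2⟩]

theorem grow1_halt (x y : List Int) (dmax : Int) (n i : Nat) {p : Nat}
    (h : ¬(p + 1 < n ∧ dispv (ext4 x y i (p + 1 - i)) ≤ dmax)) :
    grow1 x y dmax n i p = p := by
  rw [grow1]; rw [dif_neg h]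

theorem grow1_ge (x y : List Int) (dmax : Int) (n i : Nat) :
    ∀ p, p ≤ grow1 x y dmax n i p := by
  have H : ∀ (d p : Nat), n - p ≤ d → p ≤ grow1 x y dmax n i p := by
    intro d
    induction d with
    | zero =>
      intro p hd
      rw [grow1_halt x y dmax n i (by rintro ⟨h5, -⟩; omega)]
    | succ d ihd =>
      intro p hd
      by_cases h : p + 1 < n ∧ dispv (ext4 x y i (p + 1 - i)) ≤ dmax
      · rw [grow1, dif_pos h]
        have := ihd (p+1) (by omega)
        omega
      · rw [grow1_halt x y dmax n i h]
  exact fun p => H (n - p) p (le_refl _)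

theorem grow1_lt (x y : List Int) (dmax : Int) (n i : Nat) :
    ∀ p, p < n → grow1 x y dmax n i p < n := by
  have H : ∀ (d p : Nat), n - p ≤ d → p < n → grow1 x y dmax n i p < n := by
    intro d
    induction d with
    | zero => intro p hd hp; omega
    | succ d ihd =>
      intro p hd hp
      by_cases h : p + 1 < n ∧ dispv (ext4 x y i (p + 1 - i)) ≤ dmax
      · rw [grow1, dif_pos h]
        exact ihd (p+1) (by omega) h.1
      · rw [grow1_halt x y dmax n i h]
        exact hp
  exact fun p hp => H (n - p) p (le_refl _) hp

theorem grow1_chain (x y : List Int) (dmax : Int) (n i : Nat) {p : Nat}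
    (hip : i ≤ p) (hpn : p < n)
    (hall : ∀ q, i < q → q ≤ p → dispv (ext4 x y i (q - i)) ≤ dmax) :
    grow1 x y dmax n i i = grow1 x y dmax n i p := by
  induction p, hip using Nat.le_induction with
  | base => rfl
  | succ p hip ih =>
    rw [ih (by omega) (fun q h1 h2 => hall q h1 (by omega))]
    exact grow1_step x y dmax n i (by omega)
      (hall (p+1) (by omega) (by omega))

-- ----- A's inner loop computes grow1 -----

theorem if_gt_max (a m : Int) : (if a > m then a else m) = max m a := by
  rw [max_def]; split_ifs <;> omega

theorem if_lt_min (a m : Int) : (if a < m then a else m) = min m a := by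
  rw [min_def]; split_ifs <;> omega

theorem ext4_succ (x y : List Int) (i : Nat) {j : Nat} (h : 1 ≤ j) :
    ext4 x y i j = qcomb (ext4 x y i (j - 1)) (quadP (x.getD (i+j) 0, y.getD (i+j) 0)) := by
  match j, h with
  | k+1, _ =>
    rw [ext4]
    have h2 : i + (k+1) = i + k + 1 := by omega
    rw [h2]
    norm_num

theorem innerA_grow1 (x y : List Int) (dmax : Int) (n i : Nat) :
    ∀ (fuel j : Nat) (mX nX mY nY : Int), 1 ≤ j → i + j ≤ n → n ≤ fuel + (i + j) →
    (mX, nX, mY, nY) = ext4 x y i (j - 1) →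
    i + innerA x y dmax n i fuel j mX nX mY nY - 1 = grow1 x y dmax n i (i + j - 1) := by
  intro fuel
  induction fuel with
  | zero =>
    intro j mX nX mY nY h1 h2 h3 h4
    have hn : i + j = n := by omega
    rw [innerA, grow1_halt x y dmax n i (by rintro ⟨h5, -⟩; omega)]
  | succ fuel ih =>
    intro j mX nX mY nY h1 h2 h3 h4
    rw [innerA]
    by_cases hc : j + i < n
    · simp only [if_pos hc]
      have hq : (if x.getD (i+j) 0 > mX then x.getD (i+j) 0 else mX,
                 if x.getD (i+j) 0 < nX then x.getD (i+j) 0 else nX,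
                 if y.getD (i+j) 0 > mY then y.getD (i+j) 0 else mY,
                 if y.getD (i+j) 0 < nY then y.getD (i+j) 0 else nY) = ext4 x y i j := by
        rw [ext4_succ x y i h1, ← h4,
            if_gt_max, if_lt_min, if_gt_max, if_lt_min]
        rfl
      rw [Prod.mk.injEq, Prod.mk.injEq, Prod.mk.injEq] at hq
      obtain ⟨e1, e2, e3, e4⟩ := hq
      rw [e1, e2, e3, e4]
      by_cases hd : (ext4 x y i j).1 - (ext4 x y i j).2.1 +
          ((ext4 x y i j).2.2.1 - (ext4 x y i j).2.2.2) > dmax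
      · simp only [if_pos hd]
        rw [grow1_halt x y dmax n i]
        rintro ⟨-, hcon⟩
        have hds : (i + j - 1) + 1 - i = j := by omega
        rw [hds] at hcon
        simp only [dispv] at hcon
        omega
      · simp only [if_neg hd]
        have hrec := ih (j+1) (ext4 x y i j).1 (ext4 x y i j).2.1
          (ext4 x y i j).2.2.1 (ext4 x y i j).2.2.2 (by omega) (by omega) (by omega)
          (by rw [Nat.add_sub_cancel])
        rw [hrec]
        have hstep : grow1 x y dmax n i (i + j - 1) = grow1 x y dmax n i (i + j) := by
          have h5 : (i + j - 1) + 1 = i + j := by omega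
          have := grow1_step x y dmax n i (p := i + j - 1)
            (by omega)
            (by rw [h5]
                have : i + j - i = j := by omega
                rw [this]
                simp only [dispv] at hd ⊢
                omega)
          rw [this, h5]
        rw [hstep]
        try congr 1
        try omega
    · simp only [if_neg hc]
      have hn : i + j = n := by omega
      rw [grow1_halt x y dmax n i (by rintro ⟨h5, -⟩; omega)]

-- ----- queue abstraction for B -----

def cacheQ (e : St) : Int × Int × Int × Int := (e.cMX, e.cmX, e.cMY, e.cmY)

def cache? (s : List St) : Option (Int × Int × Int × Int) := s.head?.map cacheQ

def mkB (l : List (Int × Int)) : List St := l.foldl (fun s p => pushQ s p.1 p.2) []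

def mkF (l : List (Int × Int)) : List St := mkB l.reverse

theorem cache?_pushQ (s : List St) (a b : Int) :
    cache? (pushQ s a b) =
      some (match cache? s with
            | none => quadP (a, b)
            | some e => qcomb e (quadP (a, b))) := by
  cases s <;> simp [pushQ, cache?, cacheQ, qcomb, quadP]

theorem cache?_foldl_some :
    ∀ (l : List (Int × Int)) (s : List St) (e : Int × Int × Int × Int), cache? s = some e →
    cache? (l.foldl (fun s p => pushQ s p.1 p.2) s) = some (Fq e l) := by
  intro l
  induction l with
  | nil => intro s e h; simpa [Fq] using h
  | cons p t ih =>
    intro s e h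
    rw [List.foldl_cons]
    rw [ih (pushQ s p.1 p.2) (qcomb e (quadP p)) (by rw [cache?_pushQ, h])]
    rfl

theorem cache?_mkB (l : List (Int × Int)) (h : l ≠ []) : cache? (mkB l) = some (Eq4 l) := by
  match l with
  | p :: t =>
    unfold mkB
    rw [List.foldl_cons]
    rw [cache?_foldl_some t (pushQ [] p.1 p.2) (quadP p) (by rw [cache?_pushQ]; rfl)]
    rfl

theorem cache?_mkF (l : List (Int × Int)) (h : l ≠ []) : cache? (mkF l) = some (Eq4 l) := by
  unfold mkF
  rw [cache?_mkB l.reverse (by simpa using h), Eq4_reverse]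

theorem pushQ_eq_cons (s : List St) (a b : Int) : ∃ e, pushQ s a b = e :: s := by
  cases s <;> exact ⟨_, rfl⟩

theorem mkB_concat (l : List (Int × Int)) (p : Int × Int) :
    mkB (l ++ [p]) = pushQ (mkB l) p.1 p.2 := by
  unfold mkB; rw [List.foldl_append]; rfl

theorem mkF_cons (p : Int × Int) (t : List (Int × Int)) :
    mkF (p :: t) = pushQ (mkF t) p.1 p.2 := by
  unfold mkF; rw [List.reverse_cons, mkB_concat]

def strip (s : List St) : List (Int × Int) := s.map (fun e => (e.px, e.py))

theorem strip_pushQ (s : List St) (a b : Int) : strip (pushQ s a b) = (a, b) :: strip s := by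
  cases s <;> simp [pushQ, strip]

theorem strip_mkB : ∀ l : List (Int × Int), strip (mkB l) = l.reverse := by
  intro l
  induction l using List.reverseRecOn with
  | nil => rfl
  | append_singleton l p ih =>
    rw [mkB_concat, strip_pushQ, ih, List.reverse_append]
    rfl

theorem flushQ_foldl : ∀ (s : List St) (f : List St),
    flushQ s f = (strip s).foldl (fun s p => pushQ s p.1 p.2) f := by
  intro s
  induction s with
  | nil => intro f; rfl
  | cons e t ih => intro f; rw [flushQ, ih]; rfl

theorem flushQ_mkB (l : List (Int × Int)) : flushQ (mkB l) [] = mkF l := by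
  rw [flushQ_foldl, strip_mkB]; rfl

def QInv (x y : List Int) (front back : List St) (wl wr : Nat) : Prop :=
  ∃ m, wl ≤ m ∧ m ≤ wr ∧ front = mkF (ptsL x y wl m) ∧ back = mkB (ptsL x y m wr)

theorem popFrontQ_inv (x y : List Int) {front back : List St} {wl wr : Nat}
    (h : QInv x y front back wl wr) (hlt : wl < wr) :
    QInv x y (popFrontQ front back).1 (popFrontQ front back).2 (wl+1) wr := by
  obtain ⟨m, h1, h2, hf, hb⟩ := h
  by_cases hm : wl < m
  · rw [hf, ptsL_cons x y hm, mkF_cons]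
    obtain ⟨e, he⟩ := pushQ_eq_cons (mkF (ptsL x y (wl+1) m)) (x.getD wl 0) (y.getD wl 0)
    rw [he]
    exact ⟨m, by omega, h2, rfl, hb⟩
  · have hm' : m = wl := by omega
    subst hm'
    rw [hf, ptsL_nil x y (le_refl _)]
    rw [hb]
    show QInv x y (popFrontQ [] (mkB (ptsL x y m wr))).1 (popFrontQ [] (mkB (ptsL x y m wr))).2 (m+1) wr
    have hflush : flushQ (mkB (ptsL x y m wr)) [] = mkF (ptsL x y m wr) := flushQ_mkB _
    rw [popFrontQ, hflush, ptsL_cons x y (show m < wr by omega), mkF_cons]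
    obtain ⟨e, he⟩ := pushQ_eq_cons (mkF (ptsL x y (m+1) wr)) (x.getD m 0) (y.getD m 0)
    rw [he]
    exact ⟨wr, by omega, le_refl _, rfl, by rw [ptsL_nil x y (le_refl _)]; rfl⟩

theorem popLoop_inv (x y : List Int) {i wr : Nat} :
    ∀ (d : Nat) (front back : List St) (wl : Nat), i - wl ≤ d → wl ≤ i → i ≤ wr →
    QInv x y front back wl wr →
    (popLoop front back wl i).2.2 = i ∧
    QInv x y (popLoop front back wl i).1 (popLoop front back wl i).2.1 i wr := by
  intro d
  induction d with
  | zero =>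
    intro front back wl hd h1 h2 hq
    have : wl = i := by omega
    subst this
    rw [popLoop]
    simp [hq]
  | succ d ih =>
    intro front back wl hd h1 h2 hq
    by_cases hlt : wl < i
    · rw [popLoop, if_pos hlt]
      exact ih _ _ (wl+1) (by omega) (by omega) h2
        (popFrontQ_inv x y hq (by omega))
    · have : wl = i := by omega
      subst this
      rw [popLoop]
      simp [hq]

theorem qExtrema_inv (x y : List Int) {front back : List St} {wl wr : Nat}
    (h : QInv x y front back wl wr) (hlt : wl < wr) :
    qExtrema front back = ext4 x y wl (wr - 1 - wl) := by
  have hx : wl + (wr - 1 - wl) + 1 = wr := by omega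
  rw [ext4_eq, hx]
  obtain ⟨m, h1, h2, hf, hb⟩ := h
  by_cases hm1 : wl < m <;> by_cases hm2 : m < wr
  · -- both stacks nonempty
    have hcf := cache?_mkF (ptsL x y wl m) (ptsL_ne x y hm1)
    have hcb := cache?_mkB (ptsL x y m wr) (ptsL_ne x y hm2)
    rw [← hf] at hcf; rw [← hb] at hcb
    match front, back, hcf, hcb with
    | ef :: _, eb :: _, hcf, hcb =>
      simp only [cache?, List.head?, Option.map_some] at hcf hcb
      have hef : cacheQ ef = Eq4 (ptsL x y wl m) := by injection hcf
      have heb : cacheQ eb = Eq4 (ptsL x y m wr) := by injection hcb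
      show qcomb (cacheQ ef) (cacheQ eb) = _
      rw [hef, heb, ← Eq4_append _ _ (ptsL_ne x y hm1) (ptsL_ne x y hm2),
          ptsL_append x y (by omega) (by omega)]
  · -- back empty: m = wr
    have hm' : wr = m := by omega
    subst hm'
    rw [ptsL_nil x y (le_refl _)] at hb
    have hcf := cache?_mkF (ptsL x y wl wr) (ptsL_ne x y hlt)
    rw [← hf] at hcf
    match front, back, hb, hcf with
    | ef :: _, [], _, hcf =>
      simp only [cache?, List.head?, Option.map_some] at hcf
      have hef : cacheQ ef = Eq4 (ptsL x y wl wr) := by injection hcf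
      show cacheQ ef = _
      rw [hef]
  · -- front empty: m = wl
    have hm' : m = wl := by omega
    subst hm'
    rw [ptsL_nil x y (le_refl _)] at hf
    have hcb := cache?_mkB (ptsL x y m wr) (ptsL_ne x y hlt)
    rw [← hb] at hcb
    match front, back, hf, hcb with
    | [], eb :: _, _, hcb =>
      simp only [cache?, List.head?, Option.map_some] at hcb
      have heb : cacheQ eb = Eq4 (ptsL x y m wr) := by injection hcb
      show cacheQ eb = _
      rw [heb]
  · omega

theorem growLoop_inv (x y : List Int) (dmax : Int) (n i : Nat) :
    ∀ (fuel wr : Nat) (front back : List St),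
    QInv x y front back i wr → i < wr → wr ≤ n → n ≤ fuel + wr →
    (growLoop x y dmax n fuel wr front back).2.2 = grow1 x y dmax n i (wr - 1) + 1 ∧
    QInv x y (growLoop x y dmax n fuel wr front back).1
      (growLoop x y dmax n fuel wr front back).2.1 i (growLoop x y dmax n fuel wr front back).2.2 ∧
    (growLoop x y dmax n fuel wr front back).2.2 ≤ n ∧
    ((growLoop x y dmax n fuel wr front back).2.2 = wr ∨
      dispv (ext4 x y i ((growLoop x y dmax n fuel wr front back).2.2 - 1 - i)) ≤ dmax) := by
  intro fuel
  induction fuel with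
  | zero =>
    intro wr front back hq h1 h2 h3
    have hwn : wr = n := by omega
    refine ⟨?_, hq, h2, Or.inl rfl⟩
    show wr = grow1 x y dmax n i (wr - 1) + 1
    rw [grow1_halt x y dmax n i (by rintro ⟨h5, -⟩; omega)]
    omega
  | succ fuel ih =>
    intro wr front back hq h1 h2 h3
    rw [growLoop]
    by_cases hw : wr < n
    · simp only [if_pos hw]
      have hqe : qExtrema front back = ext4 x y i (wr - 1 - i) := qExtrema_inv x y hq h1
      have hcand : (max (qExtrema front back).1 (x.getD wr 0),
                    min (qExtrema front back).2.1 (x.getD wr 0),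
                    max (qExtrema front back).2.2.1 (y.getD wr 0),
                    min (qExtrema front back).2.2.2 (y.getD wr 0)) = ext4 x y i (wr - i) := by
        rw [hqe]
        have hk : wr - i = (wr - 1 - i) + 1 := by omega
        rw [hk, ext4]
        have hidx : i + (wr - 1 - i) + 1 = wr := by omega
        rw [hidx]
        rfl
      rw [Prod.mk.injEq, Prod.mk.injEq, Prod.mk.injEq] at hcand
      obtain ⟨e1, e2, e3, e4⟩ := hcand
      rw [e1, e2, e3, e4]
      by_cases hd : (ext4 x y i (wr - i)).1 - (ext4 x y i (wr - i)).2.1 +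
          ((ext4 x y i (wr - i)).2.2.1 - (ext4 x y i (wr - i)).2.2.2) > dmax
      · simp only [if_pos hd]
        refine ⟨?_, hq, h2, Or.inl (by first | rfl | trivial)⟩
        rw [grow1_halt x y dmax n i]
        · omega
        · rintro ⟨-, hcon⟩
          have h5 : (wr - 1) + 1 = wr := by omega
          rw [h5] at hcon
          simp only [dispv] at hcon
          omega
      · simp only [if_neg hd]
        obtain ⟨m, hm1, hm2, hf, hb⟩ := hq
        have hq' : QInv x y front (pushQ back (x.getD wr 0) (y.getD wr 0)) i (wr+1) := by
          refine ⟨m, hm1, by omega, hf, ?_⟩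
          rw [hb, ptsL_concat x y (show m ≤ wr by omega), mkB_concat]
        have hrec := ih (wr+1) front (pushQ back (x.getD wr 0) (y.getD wr 0))
          hq' (by omega) (by omega) (by omega)
        obtain ⟨r1, r2, r3, r4⟩ := hrec
        have hstep : grow1 x y dmax n i (wr - 1) = grow1 x y dmax n i wr := by
          have h5 : (wr - 1) + 1 = wr := by omega
          have := grow1_step x y dmax n i (p := wr - 1)
            (by omega)
            (by rw [h5]; simp only [dispv] at hd ⊢; omega)
          rw [this, h5]
        refine ⟨?_, r2, r3, ?_⟩
        · rw [hstep]
          simpa using r1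
        · rcases r4 with r4 | r4
          · right
            rw [r4]
            have : wr + 1 - 1 - i = wr - i := by omega
            rw [this]
            simp only [dispv] at hd ⊢
            omega
          · right; exact r4
    · simp only [if_neg hw]
      have hwn : wr = n := by omega
      refine ⟨?_, hq, h2, Or.inl (by first | rfl | trivial)⟩
      show wr = grow1 x y dmax n i (wr - 1) + 1
      rw [grow1_halt x y dmax n i (by rintro ⟨h5, -⟩; omega)]
      omega

-- ----- the outer loops agree step by step -----

theorem outer_eq (x y time : List Int) (tfix dmax : Int) (n : Nat) :
    ∀ (fuel i wl wr : Nat) (front back : List St)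
      (acc : List Int × List Int × List (Int × Int)),
    wl ≤ i → i ≤ wr → wr ≤ n → QInv x y front back wl wr →
    (wr = i ∨ (i < wr ∧ (wr - 1 = i ∨ dispv (ext4 x y i (wr - 1 - i)) ≤ dmax))) →
    outerA x y time tfix dmax n fuel i acc =
      outerB x y time tfix dmax n fuel i wl wr front back acc := by
  intro fuel
  induction fuel with
  | zero => intro i wl wr front back acc _ _ _ _ _; rfl
  | succ fuel ih =>
    intro i wl wr front back acc h1 h2 h3 hq hv
    by_cases hi : i < n
    · -- pop to wl = i
      have hpop := popLoop_inv x y (i - wl) front back wl (le_refl _) h1 h2 hq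
      rcases hpl : popLoop front back wl i with ⟨f1, b1, wl1⟩
      rw [hpl] at hpop
      obtain ⟨hwl1, hq1⟩ := hpop
      simp only at hwl1 hq1
      rw [eq_comm] at hwl1
      subst hwl1
      -- possibly push index i (only when the queue is empty)
      by_cases hwi : i = wr
      · subst hwi
        -- here the queue is empty
        obtain ⟨m, hm1, hm2, hf, hb⟩ := hq1
        have hm : i = m := by omega
        subst hm
        rw [ptsL_nil x y (le_refl _)] at hf hb
        have hq2 : QInv x y f1 (pushQ b1 (x.getD i 0) (y.getD i 0)) i (i + 1) := by
          refine ⟨i, le_refl _, by omega, by rw [hf, ptsL_nil x y (le_refl _)], ?_⟩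
          rw [hb, ptsL_cons x y (by omega), ptsL_nil x y (le_refl _)]
          rfl
        have hgrow := growLoop_inv x y dmax n i n (i+1) f1
          (pushQ b1 (x.getD i 0) (y.getD i 0)) hq2 (by omega) (by omega) (by omega)
        rcases hgl : growLoop x y dmax n n (i+1) f1 (pushQ b1 (x.getD i 0) (y.getD i 0))
          with ⟨f2, b2, wr2⟩
        rw [hgl] at hgrow
        obtain ⟨hg1, hg2, hg3, hg4⟩ := hgrow
        simp only at hg1 hg2 hg3 hg4
        have hg1' : wr2 = grow1 x y dmax n i i + 1 := by simpa using hg1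
        -- A's window end equals B's
        have hA := innerA_grow1 x y dmax n i n 1 (x.getD i 0) (x.getD i 0)
          (y.getD i 0) (y.getD i 0) (le_refl _) (by omega) (by omega) rfl
        have hpos : i + innerA x y dmax n i n 1 (x.getD i 0) (x.getD i 0)
            (y.getD i 0) (y.getD i 0) - 1 = wr2 - 1 := by
          rw [hA]
          have h5 : i + 1 - 1 = i := by omega
          rw [h5, hg1']
          omega
        have hlt : wr2 - 1 < n := by
          have := grow1_lt x y dmax n i i (by omega)
          omega
        have hge : i ≤ wr2 - 1 := by
          have := grow1_ge x y dmax n i i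
          omega
        rw [outerA, outerB]
        simp only [if_pos hi, hpl, hgl, if_true]
        rw [hpos, if_neg (show ¬ wr2 - 1 ≥ n by omega)]
        by_cases hfix : time.getD (wr2 - 1) 0 - time.getD i 0 > tfix
        · rw [if_pos hfix, if_pos hfix]
          exact ih (wr2 - 1) i wr2 f2 b2 _ hge (by omega) hg3 hg2
            (Or.inr ⟨by omega, Or.inl rfl⟩)
        · rw [if_neg hfix, if_neg hfix]
          refine ih (i + 1) i wr2 f2 b2 acc (by omega) (by omega) hg3 hg2 ?_
          by_cases hw2 : wr2 = i + 1
          · exact Or.inl hw2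
          · refine Or.inr ⟨by omega, ?_⟩
            by_cases hww : wr2 - 1 = i + 1
            · exact Or.inl hww
            · right
              have hok : dispv (ext4 x y i (wr2 - 1 - i)) ≤ dmax := by
                rcases hg4 with hg4 | hg4
                · omega
                · exact hg4
              calc dispv (ext4 x y (i+1) (wr2 - 1 - (i+1)))
                  ≤ dispv (ext4 x y i (wr2 - 1 - i)) := by
                    have := dispv_left_step x y (i := i) (q := wr2 - 1) (by omega)
                    simpa using this
                _ ≤ dmax := hok
      · -- wr ≠ i, so i < wr and the carried window [i, wr) is already valid
        have hwi' : ¬ wr = i := fun h => hwi h.symm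
        have hiw : i < wr := by omega
        rcases hv with hv | hv
        · omega
        have hgrow := growLoop_inv x y dmax n i n wr f1 b1 hq1 hiw h3 (by omega)
        rcases hgl : growLoop x y dmax n n wr f1 b1 with ⟨f2, b2, wr2⟩
        rw [hgl] at hgrow
        obtain ⟨hg1, hg2, hg3, hg4⟩ := hgrow
        simp only at hg1 hg2 hg3 hg4
        -- grow1 from wr-1 equals grow1 from i (the carried window is valid for i)
        have hchain : grow1 x y dmax n i i = grow1 x y dmax n i (wr - 1) := by
          rcases hv.2 with hv2 | hv2
          · rw [hv2]
          · exact grow1_chain x y dmax n i (by omega) (by omega)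
              (fun q hq1' hq2' => by
                have : dispv (ext4 x y i (q - i)) ≤ dispv (ext4 x y i (wr - 1 - i)) :=
                  dispv_ext4_mono x y i (by omega)
                omega)
        have hA := innerA_grow1 x y dmax n i n 1 (x.getD i 0) (x.getD i 0)
          (y.getD i 0) (y.getD i 0) (le_refl _) (by omega) (by omega) rfl
        have hpos : i + innerA x y dmax n i n 1 (x.getD i 0) (x.getD i 0)
            (y.getD i 0) (y.getD i 0) - 1 = wr2 - 1 := by
          rw [hA]
          have h5 : i + 1 - 1 = i := by omega
          rw [h5, hchain, hg1]
          omega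
        have hlt : wr2 - 1 < n := by
          have := grow1_lt x y dmax n i (wr - 1) (by omega)
          omega
        have hge : i ≤ wr2 - 1 := by
          have := grow1_ge x y dmax n i (wr - 1)
          omega
        rw [outerA, outerB]
        simp only [if_pos hi, hpl, if_neg hwi', hgl]
        rw [hpos, if_neg (show ¬ wr2 - 1 ≥ n by omega)]
        by_cases hfix : time.getD (wr2 - 1) 0 - time.getD i 0 > tfix
        · rw [if_pos hfix, if_pos hfix]
          exact ih (wr2 - 1) i wr2 f2 b2 _ hge (by omega) hg3 hg2
            (Or.inr ⟨by omega, Or.inl rfl⟩)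
        · rw [if_neg hfix, if_neg hfix]
          refine ih (i + 1) i wr2 f2 b2 acc (by omega) (by omega) hg3 hg2 ?_
          by_cases hw2 : wr2 = i + 1
          · exact Or.inl hw2
          · refine Or.inr ⟨by omega, ?_⟩
            by_cases hww : wr2 - 1 = i + 1
            · exact Or.inl hww
            · right
              have hok : dispv (ext4 x y i (wr2 - 1 - i)) ≤ dmax := by
                rcases hg4 with hg4 | hg4
                · rw [hg4]
                  rcases hv.2 with hv2 | hv2
                  · omega
                  · exact hv2
                · exact hg4
              calc dispv (ext4 x y (i+1) (wr2 - 1 - (i+1)))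
                  ≤ dispv (ext4 x y i (wr2 - 1 - i)) := by
                    have := dispv_left_step x y (i := i) (q := wr2 - 1) (by omega)
                    simpa using this
                _ ≤ dmax := hok
    · rw [outerA, outerB]
      simp [hi]

-- ===== VERDICT (by name: the statement is the Claim_ definition above) =====
theorem fixation_IDT_V2_spec : Claim_equal_fixation_IDT_V2 := by
  intro x y time tfix dmax _ _
  unfold Spec_fixation_IDT_V2 fixation_IDT_V2 fixation_IDT_V2_alt
  exact outer_eq x y time tfix dmax x.length (x.length + 1) 0 0 0 [] [] ([], [], [])
    (le_refl _) (le_refl _) (Nat.zero_le _)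
    ⟨0, le_refl _, le_refl _, by rw [ptsL_nil x y (le_refl _)]; rfl,
      by rw [ptsL_nil x y (le_refl _)]; rfl⟩
    (Or.inl rfl)
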